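-- pv_equiv track=rewrite | github.com/dlu02/stage1a | scripts/histogramme.py | discretes_continues
-- ===== SOURCE A (Python) =====
-- def discretes_continues(data):
-- 	data = [x for x in data]
-- 	dic_donnees = {}
-- 	for x in sorted(data):
-- 		dic_donnees[x] = data.count(x)
-- 	effectifs = [v for v in dic_donnees.values()]
-- 	# test
-- 	if max(effectifs) > 1:
-- 		return "discrete"
-- 	else:
-- 		return "continue"
-- ===== SOURCE B (Python) =====
-- def discretes_continues(data):
--     s = sorted(data)
--     if any(a == b for a, b in zip(s, s[1:])):
--         return "discrete"
--     return "continue"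
-- ===== Notes on version B (the rewrite author's own statement) =====
-- stated objective: faster
-- what changed: Replaces the dict built by calling data.count(x) for every element of the sorted data with a single sort followed by one adjacent-equal scan over consecutive sorted elements.
-- outside the precondition, e.g. on discretes_continues([]): A raises ValueError, B returns 'continue'
import Mathlib
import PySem

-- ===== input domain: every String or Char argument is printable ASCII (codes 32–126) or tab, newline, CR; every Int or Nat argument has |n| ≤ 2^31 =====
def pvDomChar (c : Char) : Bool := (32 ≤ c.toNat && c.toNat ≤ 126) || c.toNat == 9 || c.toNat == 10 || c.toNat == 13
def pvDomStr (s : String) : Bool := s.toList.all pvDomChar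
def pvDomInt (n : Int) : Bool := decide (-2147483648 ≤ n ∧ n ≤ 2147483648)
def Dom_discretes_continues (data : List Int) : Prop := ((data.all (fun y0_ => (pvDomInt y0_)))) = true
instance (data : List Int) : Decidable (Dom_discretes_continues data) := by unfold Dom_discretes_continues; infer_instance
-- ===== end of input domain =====

-- B replaces A's dict of per-value data.count(x) values with one sort plus an adjacent-equal scan.


-- ===== PORT A =====
def discretes_continues (data : List Int) : String :=
  -- data = [x for x in data]
  let data2 := data.map (fun x => x)
  -- dic_donnees = {}; for x in sorted(data): dic_donnees[x] = data.count(x)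
  let dic := (PySem.List.sorted data2 (fun x => x) false).foldl
      (fun d x => d.insert x ((PySem.List.count data2 x : Int))) PySem.Dict.empty
  -- effectifs = [v for v in dic_donnees.values()]
  let effectifs := (PySem.Dict.values dic).map (fun v => v)
  -- if max(effectifs) > 1: …  (max([]) raises ValueError: excluded by Pre_)
  match PySem.List.max? effectifs (fun v => v) with
  | none => ""
  | some m => if m > 1 then "discrete" else "continue"

-- ===== PORT B =====
def discretes_continues_alt (data : List Int) : String :=
  let s := PySem.List.sorted data (fun x => x) false
  if (s.zip (PySem.List.slice s (some 1) none)).any (fun p => p.1 == p.2) then "discrete"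
  else "continue"

-- ===== PRECONDITION & SPEC =====
-- Pre_ excludes only the empty list, on which A's max([]) raises ValueError (B there returns "continue").
def Pre_discretes_continues (data : List Int) : Prop := data ≠ []
instance (data : List Int) : Decidable (Pre_discretes_continues data) := by
  unfold Pre_discretes_continues; infer_instance
def pvWitness_discretes_continues : List Int := [1, 2, 2]

def Spec_discretes_continues (data : List Int) (out : String) : Prop := out = discretes_continues_alt data
instance (data : List Int) (out : String) : Decidable (Spec_discretes_continues data out) := by unfold Spec_discretes_continues; infer_instance

-- ===== CLAIM (what is proved, stated in full; the proofs are below) =====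
def Claim_equal_discretes_continues : Prop := ∀ (data : List Int), Dom_discretes_continues data → Pre_discretes_continues data → Spec_discretes_continues data (discretes_continues data)

-- ===== LEMMAS AND PROOFS =====

-- getD after a loop inserting a key-determined value
lemma getD_foldl_insert_key (l : List Int) (f : Int → Int) (d : PySem.Dict Int Int) (k : Int) :
    (l.foldl (fun d x => d.insert x (f x)) d).getD k 0
      = if k ∈ l then f k else d.getD k 0 := by
  induction l generalizing d with
  | nil => simp
  | cons a t ih =>
    simp only [List.foldl_cons, ih, PySem.Dict.getD_insert, List.mem_cons]
    by_cases hk : k ∈ t <;> by_cases ha : k = a <;> simp [hk, ha]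

-- A = "discrete" ↔ some element repeats
lemma portA_char (data : List Int) (h : data ≠ []) :
    discretes_continues data = (if data.Nodup then "continue" else "discrete") := by
  unfold discretes_continues
  simp only [List.map_id_fun', id]
  set s := PySem.List.sorted data (fun x => x) false with hs
  have hperm : s.Perm data := PySem.List.sorted_perm data (fun x => x) false
  set dic := s.foldl (fun d x => d.insert x ((PySem.List.count data x : Int))) PySem.Dict.empty
    with hdic
  have hkeys : PySem.Dict.keys dic = PySem.Set.ofList s := by
    rw [hdic, PySem.Dict.keys_foldl_insert]
    simp [PySem.Set.update_nil_left]
  have hnd : (PySem.Dict.keys dic).Nodup := by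
    rw [hkeys]; exact PySem.Set.nodup_ofList s
  have hvals : PySem.Dict.values dic = (PySem.Dict.keys dic).map (fun k => dic.getD k 0) :=
    PySem.Dict.values_eq_map_keys dic hnd 0
  have hget : ∀ k, dic.getD k 0 = if k ∈ s then (data.count k : Int) else 0 := by
    intro k
    rw [hdic, getD_foldl_insert_key]
    simp [PySem.List.count]
  -- values = counts of the distinct elements
  have hvals2 : PySem.Dict.values dic
      = (PySem.Set.ofList s).map (fun k => (data.count k : Int)) := by
    rw [hvals, hkeys]
    apply List.map_congr_left
    intro k hk
    rw [hget k]
    simp [(PySem.Set.mem_ofList s k).mp hk]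
  have hsne : s ≠ [] := by
    intro h0
    have hp2 := hperm.symm
    rw [h0] at hp2
    exact h hp2.eq_nil
  have hone : PySem.Set.ofList s ≠ [] := by
    obtain ⟨a, t, h'⟩ := List.exists_cons_of_ne_nil hsne
    have ha : a ∈ s := by rw [h']; exact List.mem_cons_self
    have hmem : a ∈ PySem.Set.ofList s := (PySem.Set.mem_ofList s a).mpr ha
    intro hc; rw [hc] at hmem; simp at hmem
  have hvne : PySem.Dict.values dic ≠ [] := by
    rw [hvals2]
    intro hc
    exact hone (List.map_eq_nil_iff.mp hc)
  obtain ⟨v0, vs, hv⟩ := List.exists_cons_of_ne_nil hvne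
  simp only [hv]
  have hmax : PySem.List.max? (v0 :: vs) (fun v => v) = some (vs.foldl max v0) :=
    PySem.List.max?_id_cons v0 vs
  rw [← hv] at hmax ⊢
  rw [hmax]
  have hmem : PySem.List.max? (PySem.Dict.values dic) (fun v => v) = some (vs.foldl max v0) := hmax
  have hmmem : vs.foldl max v0 ∈ PySem.Dict.values dic := PySem.List.max?_mem hmem
  have hmmax : ∀ y ∈ PySem.Dict.values dic, y ≤ vs.foldl max v0 := by
    intro y hy; exact PySem.List.max?_isMax hmem y hy
  -- max > 1 ↔ some count > 1 ↔ ¬ Nodup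
  have key : (1 < vs.foldl max v0) ↔ ¬ data.Nodup := by
    constructor
    · intro hgt hnodup
      rw [hvals2] at hmmem
      obtain ⟨k, _, hk⟩ := List.mem_map.mp hmmem
      have := List.nodup_iff_count_le_one.mp hnodup k
      omega
    · intro hnd
      rw [List.nodup_iff_count_le_one] at hnd
      rw [not_forall] at hnd
      obtain ⟨k, hk⟩ := hnd
      have hkin : k ∈ data := by
        by_contra hne
        rw [List.count_eq_zero_of_not_mem hne] at hk; omega
      have hks : k ∈ s := hperm.mem_iff.mpr hkin
      have hkv : (data.count k : Int) ∈ PySem.Dict.values dic := by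
        rw [hvals2]
        exact List.mem_map.mpr ⟨k, (PySem.Set.mem_ofList s k).mpr hks, rfl⟩
      have := hmmax _ hkv
      omega
  by_cases hnd : data.Nodup
  · have : ¬ (1 < vs.foldl max v0) := fun hgt => (key.mp hgt) hnd
    simp [hnd, this]
  · have : 1 < vs.foldl max v0 := key.mpr hnd
    simp [hnd, this]

-- adjacent-equal scan on a ≤-sorted list detects exactly non-Nodup
lemma adj_scan_char (s : List Int) (hp : s.Pairwise (· ≤ ·)) :
    (s.zip s.tail).any (fun p => p.1 == p.2) = !decide s.Nodup := by
  induction s with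
  | nil => simp
  | cons a t ih =>
    cases t with
    | nil => simp
    | cons b t' =>
      have hp' : (b :: t').Pairwise (· ≤ ·) := hp.tail
      have hab : a ≤ b := (List.pairwise_cons.mp hp).1 b (by simp)
      have hble : ∀ y ∈ t', b ≤ y := (List.pairwise_cons.mp hp').1
      have ih' := ih hp'
      simp only [List.tail_cons] at ih'
      simp only [List.tail_cons, List.zip_cons_cons, List.any_cons, ih']
      by_cases heq : a = b
      · subst heq
        have hnn : ¬ (a :: a :: t').Nodup := by simp
        simp [hnn]
      · have hna : a ∉ b :: t' := by
          intro hmem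
          rcases List.mem_cons.mp hmem with h1 | h2
          · exact heq h1
          · have h3 := hble a h2
            exact heq (le_antisymm hab h3)
        have hiff : (a :: b :: t').Nodup ↔ (b :: t').Nodup := by
          simp [List.nodup_cons, hna]
        by_cases hn : (b :: t').Nodup
        · simp [heq, hn, hiff.mpr hn]
        · have hnn : ¬ (a :: b :: t').Nodup := fun c => hn (hiff.mp c)
          simp [hn, hnn]

-- B = "discrete" ↔ some element repeats
lemma portB_char (data : List Int) :
    discretes_continues_alt data = (if data.Nodup then "continue" else "discrete") := by
  unfold discretes_continues_alt
  have hperm : (PySem.List.sorted data (fun x => x) false).Perm data :=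
    PySem.List.sorted_perm data (fun x => x) false
  have hp : (PySem.List.sorted data (fun x => x) false).Pairwise (· ≤ ·) := by
    have := PySem.List.sorted_pairwise data (fun x => x)
    simpa using this
  simp only [PySem.List.slice_from_one]
  rw [adj_scan_char _ hp]
  have hnd : (PySem.List.sorted data (fun x => x) false).Nodup ↔ data.Nodup := hperm.nodup_iff
  by_cases h : data.Nodup
  · simp [h, hnd.mpr h]
  · have : ¬ (PySem.List.sorted data (fun x => x) false).Nodup := fun c => h (hnd.mp c)
    simp [h, this]

-- ===== VERDICT (by name: the statement is the Claim_ definition above) =====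
theorem discretes_continues_spec : Claim_equal_discretes_continues := by
  intro data _ hpre
  unfold Spec_discretes_continues
  rw [portA_char data hpre, portB_char data]
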